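-- pv_equiv track=rewrite | github.com/pjuju/algorithm-restudy | 프로그래머스/lv2/87390. n＾2 배열 자르기/n＾2 배열 자르기.py | solution
-- ===== SOURCE A (Python) =====
-- def solution(n, left, right):
--     result = []
--     for i in range(left+1, right+2):
--         if i % n == 0:
--             result.append(n)
--         else:
--             result.append(max((i//n)+1,i%n))
--     return result
-- ===== SOURCE B (Python) =====
-- def solution(n, left, right):
--     result = []
--     sr, er = left // n, right // n
--     for r in range(sr, er + 1):
--         c0 = left % n if r == sr else 0
--         c1 = right % n if r == er else n - 1
--         for c in range(c0, c1 + 1):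
--             result.append(n if c == n - 1 else max(r, c) + 1)
--     return result
-- ===== Notes on version B (the rewrite author's own statement) =====
-- stated objective: alternative
-- what changed: Replaces A's single flat scan over shifted linear indices (computing // and % per element) by a row/column decomposition: an outer loop over rows left//n..right//n with per-row column bounds and an inner loop over columns.
-- outside the precondition, e.g. on solution(-3, 0, 2): A returns [0, 0, -3], B returns []
import Mathlib
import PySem

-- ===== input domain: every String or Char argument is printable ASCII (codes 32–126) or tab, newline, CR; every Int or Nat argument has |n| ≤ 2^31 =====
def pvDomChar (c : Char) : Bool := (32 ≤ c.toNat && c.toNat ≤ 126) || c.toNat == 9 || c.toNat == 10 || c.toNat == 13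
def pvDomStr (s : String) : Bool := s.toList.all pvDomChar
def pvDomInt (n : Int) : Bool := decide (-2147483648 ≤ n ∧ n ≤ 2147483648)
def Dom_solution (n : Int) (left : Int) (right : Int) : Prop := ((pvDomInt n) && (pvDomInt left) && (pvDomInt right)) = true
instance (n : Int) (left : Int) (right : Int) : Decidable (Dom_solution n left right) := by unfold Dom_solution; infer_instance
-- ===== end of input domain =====

-- B replaces A's flat scan over shifted linear indices by a row/column double loop
-- (rows left//n..right//n with per-row column bounds); same cost, different decomposition.

-- ===== PORT A =====
def solution (n : Int) (left : Int) (right : Int) : List Int :=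
  (PySem.List.pyRange (left + 1) (right + 2) 1).foldl
    (fun result i =>
      if PySem.Int.mod i n = 0 then result ++ [n]
      else result ++ [max (PySem.Int.floordiv i n + 1) (PySem.Int.mod i n)])
    []

-- ===== PORT B =====
def solution_alt (n : Int) (left : Int) (right : Int) : List Int :=
  let sr := PySem.Int.floordiv left n
  let er := PySem.Int.floordiv right n
  (PySem.List.pyRange sr (er + 1) 1).foldl
    (fun result r =>
      let c0 := if r = sr then PySem.Int.mod left n else 0
      let c1 := if r = er then PySem.Int.mod right n else n - 1
      (PySem.List.pyRange c0 (c1 + 1) 1).foldl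
        (fun res c => res ++ [if c = n - 1 then n else max r c + 1])
        result)
    []

-- ===== PRECONDITION & SPEC =====
-- Pre_ excludes n ≤ 0: for n = 0 A raises ZeroDivisionError, and for n ≤ -1 there is no
-- n×n array to slice — A's returned values there are artefacts of Python's
-- divisor-sign floor division, so the claim is restricted to the natural domain n ≥ 1.
def Pre_solution (n : Int) (left : Int) (right : Int) : Prop := 1 ≤ n
instance (n : Int) (left : Int) (right : Int) : Decidable (Pre_solution n left right) := by
  unfold Pre_solution; infer_instance
def pvWitness_solution : Int × Int × Int := (3, 2, 5)

def Spec_solution (n : Int) (left : Int) (right : Int) (out : List Int) : Prop := out = solution_alt n left right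
instance (n : Int) (left : Int) (right : Int) (out : List Int) : Decidable (Spec_solution n left right out) := by unfold Spec_solution; infer_instance

-- ===== CLAIM (what is proved, stated in full; the proofs are below) =====
def Claim_equal_solution : Prop := ∀ (n : Int) (left : Int) (right : Int), Dom_solution n left right → Pre_solution n left right → Spec_solution n left right (solution n left right)

-- ===== LEMMAS AND PROOFS =====

-- the per-cell value, as A computes it at linear index i = k+1 (PySem ops)
def pvA (n : Int) (i : Int) : Int :=
  if PySem.Int.mod i n = 0 then n else max (PySem.Int.floordiv i n + 1) (PySem.Int.mod i n)

-- the per-cell value at linear index k, in row/column form (plain Euclidean ops; n > 0)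
def pvV (n : Int) (k : Int) : Int :=
  if k % n = n - 1 then n else max (k / n) (k % n) + 1

-- B's cell value at row r, column c
def pvCell (n : Int) (r : Int) (c : Int) : Int :=
  if c = n - 1 then n else max r c + 1

-- B's row structure, in plain form
def pvRowsL (n sr c0 er c1 : Int) : List Int :=
  (PySem.List.pyRange sr (er + 1) 1).flatMap (fun r =>
    (PySem.List.pyRange (if r = sr then c0 else 0) ((if r = er then c1 else n - 1) + 1) 1).map
      (pvCell n r))

theorem pv_divmod (n r a : Int) (hn : 0 < n) (h0 : 0 ≤ a) (h1 : a < n) :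
    (r * n + a) / n = r ∧ (r * n + a) % n = a := by
  constructor
  · rw [add_comm, Int.add_mul_ediv_right _ _ (by omega : n ≠ 0),
      Int.ediv_eq_zero_of_lt h0 h1, zero_add]
  · rw [add_comm, mul_comm, Int.add_mul_emod_self_left, Int.emod_eq_of_lt h0 h1]

theorem pv_step (n : Int) (hn : 0 < n) (m : Int) : pvA n (m + 1) = pvV n m := by
  unfold pvA pvV
  rw [PySem.Int.mod_eq_emod_of_pos hn, PySem.Int.floordiv_eq_ediv_of_pos hn]
  have ha0 : 0 ≤ m % n := Int.emod_nonneg m (by omega)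
  have ha1 : m % n < n := Int.emod_lt_of_pos m hn
  have hm : n * (m / n) + m % n = m := Int.ediv_add_emod m n
  by_cases hlast : m % n = n - 1
  · have h1 : m + 1 = n * (m / n + 1) := by rw [mul_add, mul_one]; omega
    rw [h1, Int.mul_emod_right, if_pos rfl, if_pos hlast]
  · have h2 : m + 1 = (m / n) * n + (m % n + 1) := by rw [mul_comm]; omega
    obtain ⟨hd, he⟩ := pv_divmod n (m / n) (m % n + 1) hn (by omega) (by omega)
    rw [h2, he, hd, if_neg (by omega), if_neg hlast, ← max_add_add_right]

-- a single row segment: columns [a, b] of row r are linear indices [r*n+a, r*n+b]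
theorem pv_seg (n : Int) (hn : 0 < n) :
    ∀ (N : Nat) (r a b : Int), (b + 1 - a).toNat = N → 0 ≤ a → b < n →
      (PySem.List.pyRange a (b + 1) 1).map (pvCell n r) =
        (PySem.List.pyRange (r * n + a) (r * n + b + 1) 1).map (pvV n) := by
  intro N
  induction N with
  | zero =>
    intro r a b hN h0 h1
    rw [PySem.List.pyRange_one_eq_nil (by omega), PySem.List.pyRange_one_eq_nil (by omega),
      List.map_nil, List.map_nil]
  | succ N ih =>
    intro r a b hN h0 h1
    have hab : a < b + 1 := by omega
    rw [PySem.List.pyRange_one_cons hab, PySem.List.pyRange_one_cons (by omega : r * n + a < r * n + b + 1),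
      List.map_cons, List.map_cons]
    obtain ⟨hd, he⟩ := pv_divmod n r a hn h0 (by omega)
    have hhead : pvCell n r a = pvV n (r * n + a) := by
      unfold pvCell pvV; rw [he, hd]
    rw [hhead, show r * n + a + 1 = r * n + (a + 1) from by ring,
      ih r (a + 1) b (by omega) (by omega) h1]

-- the rows structure from (sr, c0) to (er, c1) flattens to the linear range
theorem pv_rows (n : Int) (hn : 0 < n) :
    ∀ (N : Nat) (sr c0 er c1 : Int), (er - sr).toNat = N →
      0 ≤ c0 → c0 < n → 0 ≤ c1 → c1 < n →
      pvRowsL n sr c0 er c1 =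
        (PySem.List.pyRange (sr * n + c0) (er * n + c1 + 1) 1).map (pvV n) := by
  intro N
  induction N with
  | zero =>
    intro sr c0 er c1 hN h00 h01 h10 h11
    rcases lt_or_eq_of_le (show er ≤ sr by omega) with hlt | heq
    · have hmul : er * n ≤ (sr - 1) * n :=
        mul_le_mul_of_nonneg_right (by omega) (by omega)
      unfold pvRowsL
      rw [PySem.List.pyRange_one_eq_nil (by omega), List.flatMap_nil,
        PySem.List.pyRange_one_eq_nil (by nlinarith), List.map_nil]
    · subst heq
      unfold pvRowsL
      rw [PySem.List.pyRange_one_singleton]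
      simp only [List.flatMap_cons, List.flatMap_nil, List.append_nil, ite_true]
      exact pv_seg n hn (c1 + 1 - c0).toNat er c0 c1 rfl h00 h11
  | succ N ih =>
    intro sr c0 er c1 hN h00 h01 h10 h11
    have hsr : sr < er := by omega
    have hmul : (sr + 1) * n ≤ er * n :=
      mul_le_mul_of_nonneg_right (by omega) (by omega)
    unfold pvRowsL
    rw [PySem.List.pyRange_one_cons (by omega : sr < er + 1), List.flatMap_cons,
      if_pos rfl, if_neg (by omega : ¬ sr = er)]
    have hhead : (PySem.List.pyRange c0 (n - 1 + 1) 1).map (pvCell n sr) =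
        (PySem.List.pyRange (sr * n + c0) (sr * n + (n - 1) + 1) 1).map (pvV n) :=
      pv_seg n hn (n - 1 + 1 - c0).toNat sr c0 (n - 1) rfl h00 (by omega)
    have htail : (PySem.List.pyRange (sr + 1) (er + 1) 1).flatMap (fun r =>
          (PySem.List.pyRange (if r = sr then c0 else 0) ((if r = er then c1 else n - 1) + 1) 1).map
            (pvCell n r)) = pvRowsL n (sr + 1) 0 er c1 := by
      unfold pvRowsL
      rw [List.flatMap, List.flatMap]
      congr 1
      apply List.map_congr_left
      intro r hr
      rw [PySem.List.mem_pyRange_one] at hr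
      rw [if_neg (by omega : ¬ r = sr), ite_self]
    rw [hhead, htail, ih (sr + 1) 0 er c1 (by omega) le_rfl hn h10 h11,
      show (sr + 1) * n + 0 = sr * n + (n - 1) + 1 from by ring,
      ← List.map_append, ← PySem.List.pyRange_one_append _ _ _ (by omega) (by nlinarith)]

theorem pv_A_eq (n left right : Int) :
    solution n left right = (PySem.List.pyRange (left + 1) (right + 2) 1).map (pvA n) := by
  unfold solution
  have hfun : (fun (result : List Int) (i : Int) =>
      if PySem.Int.mod i n = 0 then result ++ [n]
      else result ++ [max (PySem.Int.floordiv i n + 1) (PySem.Int.mod i n)]) =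
      fun result i => result ++ [pvA n i] := by
    funext res i; unfold pvA; split <;> rfl
  rw [hfun, PySem.List.foldl_append_singleton_eq_map, List.nil_append]

theorem pv_B_eq (n left right : Int) (hn : 0 < n) :
    solution_alt n left right =
      pvRowsL n (left / n) (left % n) (right / n) (right % n) := by
  unfold solution_alt
  simp only [PySem.Int.mod_eq_emod_of_pos hn, PySem.Int.floordiv_eq_ediv_of_pos hn]
  have hfun : (fun (result : List Int) (r : Int) =>
      (PySem.List.pyRange (if r = left / n then left % n else 0)
        ((if r = right / n then right % n else n - 1) + 1) 1).foldl
        (fun res c => res ++ [if c = n - 1 then n else max r c + 1]) result) =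
      fun result r => result ++
        (PySem.List.pyRange (if r = left / n then left % n else 0)
          ((if r = right / n then right % n else n - 1) + 1) 1).map (pvCell n r) := by
    funext res r
    rw [show (fun (res : List Int) (c : Int) => res ++ [if c = n - 1 then n else max r c + 1]) =
        fun res c => res ++ [pvCell n r c] from rfl,
      PySem.List.foldl_append_singleton_eq_map]
  rw [hfun, PySem.List.foldl_append_eq_flatMap, List.nil_append]
  rfl

theorem pv_shift (n left right : Int) (hn : 0 < n) :
    (PySem.List.pyRange (left + 1) (right + 2) 1).map (pvA n) =
      (PySem.List.pyRange left (right + 1) 1).map (pvV n) := by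
  rw [PySem.List.pyRange_one, PySem.List.pyRange_one, List.map_map, List.map_map,
    show (right + 2 - (left + 1)).toNat = (right + 1 - left).toNat from by omega]
  apply List.map_congr_left
  intro k _
  simp only [Function.comp_apply]
  rw [show left + 1 + (k : Int) = (left + k) + 1 from by ring, pv_step n hn]

-- ===== VERDICT (by name: the statement is the Claim_ definition above) =====
theorem solution_spec : Claim_equal_solution := by
  intro n left right _ hpre
  have hn : 0 < n := hpre
  unfold Spec_solution
  have hl0 : 0 ≤ left % n := Int.emod_nonneg left (by omega)
  have hl1 : left % n < n := Int.emod_lt_of_pos left hn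
  have hr0 : 0 ≤ right % n := Int.emod_nonneg right (by omega)
  have hr1 : right % n < n := Int.emod_lt_of_pos right hn
  have hle : left / n * n + left % n = left := by
    rw [mul_comm]; exact Int.ediv_add_emod left n
  have hre : right / n * n + right % n = right := by
    rw [mul_comm]; exact Int.ediv_add_emod right n
  rw [pv_A_eq, pv_shift n left right hn, pv_B_eq n left right hn,
    pv_rows n hn (right / n - left / n).toNat (left / n) (left % n) (right / n) (right % n)
      rfl hl0 hl1 hr0 hr1, hle, hre]
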